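-- pv_equiv track=rewrite | github.com/Discovery-IDRs/predIDR | src/features.py | get_repeat_count
-- ===== SOURCE A (Python) =====
-- def get_repeat_count(seq):
--     """Return count of symbols in seq which appear two or more times in a row.
--
--     Parameters
--     ----------
--         seq : string
--             Protein sequence as string.
--
--     Returns
--     -------
--         repeat_count : int
--             Count of repeat symbols in seq.
--     """
--     repeat_count = 0
--
--     if len(seq) <= 1:
--         return 0
--     else:
--         pass
--
--     if seq[0] == seq[1]:
--         repeat_count += 1
--     else:
--         pass
--
--     if seq[len(seq) - 1] == seq[len(seq) - 2]:
--         repeat_count += 1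
--     else:
--         pass
--
--     if len(seq) > 2:
--         for i in range(1, len(seq) - 1):
--             if seq[i] == seq[i-1]:
--                 repeat_count += 1
--             elif seq[i] == seq[i+1]:
--                 repeat_count += 1
--             else:
--                 pass
--     else:
--         pass
--
--     return repeat_count
-- ===== SOURCE B (Python) =====
-- def get_repeat_count(seq):
--     """Run-scan: partition seq into maximal runs of equal adjacent symbols
--     and sum the lengths of the runs of length >= 2."""
--     total = 0
--     i = 0
--     n = len(seq)
--     while i < n:
--         j = i + 1
--         while j < n and seq[j] == seq[i]:
--             j += 1
--         if j - i >= 2: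
--             total += j - i
--         i = j
--     return total
-- ===== Notes on version B (the rewrite author's own statement) =====
-- stated objective: simpler
-- what changed: Replaces A's three separate boundary checks plus an index loop testing each position against both neighbours with a single run-scan that partitions the string into maximal runs and sums the lengths of runs of length >= 2.
import Mathlib
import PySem

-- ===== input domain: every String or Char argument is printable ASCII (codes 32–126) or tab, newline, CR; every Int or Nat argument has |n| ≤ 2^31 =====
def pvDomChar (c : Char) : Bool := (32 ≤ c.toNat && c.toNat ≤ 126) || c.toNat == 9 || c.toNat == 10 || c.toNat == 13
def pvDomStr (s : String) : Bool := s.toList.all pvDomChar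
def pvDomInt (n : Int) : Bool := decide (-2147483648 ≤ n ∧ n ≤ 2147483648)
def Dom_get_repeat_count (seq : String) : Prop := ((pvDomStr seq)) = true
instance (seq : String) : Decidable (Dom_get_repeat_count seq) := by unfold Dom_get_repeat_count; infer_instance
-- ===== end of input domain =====

-- B replaces A's boundary checks + neighbour-testing index loop by a run-scan
-- summing the lengths of maximal runs of length ≥ 2 (objective: simpler).

-- ===== PORT A =====
def get_repeat_count (seq : String) : Int :=
  let l := seq.toList
  let n : Int := l.length
  if n ≤ 1 then 0
  else
    let rc1 : Int := if PySem.List.pyGetD l 0 ' ' == PySem.List.pyGetD l 1 ' ' then 0 + 1 else 0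
    let rc2 : Int := if PySem.List.pyGetD l (n - 1) ' ' == PySem.List.pyGetD l (n - 2) ' ' then rc1 + 1 else rc1
    if n > 2 then
      (PySem.List.pyRange 1 (n - 1) 1).foldl (fun acc i =>
        if PySem.List.pyGetD l i ' ' == PySem.List.pyGetD l (i - 1) ' ' then acc + 1
        else if PySem.List.pyGetD l i ' ' == PySem.List.pyGetD l (i + 1) ' ' then acc + 1
        else acc) rc2
    else rc2

-- ===== PORT B =====
-- inner while loop (advance j over chars equal to seq[i]) = takeWhile/dropWhile split
def runsCount : List Char → Int
  | [] => 0
  | c :: t =>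
    let run := t.takeWhile (fun x => x == c)
    let L : Int := run.length + 1
    (if L ≥ 2 then L else 0) + runsCount (t.dropWhile (fun x => x == c))
termination_by l => l.length
decreasing_by exact Nat.lt_succ_of_le (List.length_dropWhile_le _ _)

def get_repeat_count_alt (seq : String) : Int := runsCount seq.toList

-- ===== PRECONDITION & SPEC =====
def Spec_get_repeat_count (seq : String) (out : Int) : Prop := out = get_repeat_count_alt seq
instance (seq : String) (out : Int) : Decidable (Spec_get_repeat_count seq out) := by unfold Spec_get_repeat_count; infer_instance

-- ===== CLAIM (what is proved, stated in full; the proofs are below) =====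
def Claim_equal_get_repeat_count : Prop := ∀ (seq : String), Dom_get_repeat_count seq → Spec_get_repeat_count seq (get_repeat_count seq)

-- ===== LEMMAS AND PROOFS =====

-- common characterisation: count positions equal to previous (flag pe) or next symbol
def cnt : Bool → List Char → Int
  | _, [] => 0
  | pe, [_] => if pe then 1 else 0
  | pe, x :: y :: t => (if pe || x == y then 1 else 0) + cnt (x == y) (y :: t)

-- middle-loop contribution of A
def mid : List Char → Int
  | x :: y :: z :: t => (if y = x then 1 else if y = z then 1 else 0) + mid (y :: z :: t)
  | _ => 0

-- last-pair contribution of A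
def lpA : List Char → Int
  | [x, y] => if y = x then 1 else 0
  | _ :: y :: z :: t => lpA (y :: z :: t)
  | _ => 0

theorem lpA_mid_cnt (t : List Char) : ∀ a b : Char,
    lpA (a :: b :: t) + mid (a :: b :: t) = cnt (a == b) (b :: t) := by
  induction t with
  | nil =>
    intro a b
    by_cases h : a = b
    · subst h; simp [lpA, mid, cnt]
    · have h' : ¬ b = a := fun e => h e.symm
      simp [lpA, mid, cnt, h, h']
  | cons c t ih =>
    intro a b
    have h := ih b c
    have hl : lpA (a :: b :: c :: t) = lpA (b :: c :: t) := rfl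
    have hm : mid (a :: b :: c :: t) = (if b = a then 1 else if b = c then 1 else 0) + mid (b :: c :: t) := rfl
    have hc : cnt (a == b) (b :: c :: t) = (if ((a == b) || (b == c)) then (1:Int) else 0) + cnt (b == c) (c :: t) := rfl
    rw [hl, hm, hc, ← h]
    have key : (if b = a then (1:Int) else if b = c then 1 else 0)
        = (if ((a == b) || (b == c)) then (1:Int) else 0) := by
      by_cases h1 : b = a
      · subst h1; simp
      · by_cases h2 : b = c
        · subst h2
          have h1' : ¬ a = b := fun e => h1 e.symm
          simp [h1, h1']
        · have h1' : ¬ a = b := fun e => h1 e.symm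
          simp [h1, h1', h2]
    rw [key]; ring

-- B-side: run lemmas
theorem cnt_true_run (c : Char) : ∀ (run rest : List Char),
    (∀ x ∈ run, x = c) → rest.head? ≠ some c →
    cnt true (c :: (run ++ rest)) = (run.length + 1 : Int) + cnt false rest := by
  intro run
  induction run with
  | nil =>
    intro rest _ hrest
    cases rest with
    | nil => simp [cnt]
    | cons d t =>
      have hdc : (c == d) = false := by
        refine beq_eq_false_iff_ne.mpr ?_
        intro h; exact hrest (by simp [h])
      simp only [List.nil_append, cnt, hdc]
      norm_num
  | cons y run' ih =>
    intro rest hrun hrest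
    have hy : y = c := hrun y List.mem_cons_self
    subst hy
    have h := ih rest (fun z hz => hrun z (List.mem_cons_of_mem _ hz)) hrest
    show cnt true (y :: y :: (run' ++ rest)) = _
    rw [cnt]
    simp only [beq_self_eq_true, Bool.true_or, if_true, List.length_cons]
    rw [h]
    push_cast
    ring

theorem cnt_false_run (c : Char) (run rest : List Char)
    (hrun : ∀ x ∈ run, x = c) (hrest : rest.head? ≠ some c) :
    cnt false (c :: (run ++ rest)) =
      (if (run.length : Int) + 1 ≥ 2 then (run.length : Int) + 1 else 0) + cnt false rest := by
  cases run with
  | nil =>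
    cases rest with
    | nil => simp [cnt]
    | cons d t =>
      have hdc : (c == d) = false := by
        refine beq_eq_false_iff_ne.mpr ?_
        intro h; exact hrest (by simp [h])
      simp only [List.nil_append, cnt, hdc]
      norm_num
  | cons y run' =>
    have hy : y = c := hrun y List.mem_cons_self
    subst hy
    have h := cnt_true_run y run' rest (fun z hz => hrun z (List.mem_cons_of_mem _ hz)) hrest
    show cnt false (y :: y :: (run' ++ rest)) = _
    rw [cnt]
    simp only [beq_self_eq_true, Bool.false_or, if_true, List.length_cons]
    rw [h, if_pos (by push_cast; omega)]
    push_cast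
    ring

theorem runsCount_eq_cnt : ∀ (n : ℕ) (l : List Char), l.length = n → runsCount l = cnt false l := by
  intro n
  induction n using Nat.strong_induction_on with
  | _ n ih =>
    intro l hl
    cases l with
    | nil => simp [runsCount, cnt]
    | cons c t =>
      subst hl
      rw [runsCount]
      have hrun : ∀ x ∈ t.takeWhile (fun x => x == c), x = c := by
        intro x hx
        simpa [beq_iff_eq] using List.mem_takeWhile_imp hx
      have hrest : (t.dropWhile (fun x => x == c)).head? ≠ some c := by
        intro h
        have h2 := List.head?_dropWhile_not (p := fun x => x == c) (l := t)
        rw [h] at h2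
        simp at h2
      have hlen : (t.dropWhile (fun x => x == c)).length < (c :: t).length := by
        have := List.length_dropWhile_le (fun x => x == c) t
        simp only [List.length_cons]
        omega
      have ihrest := ih _ hlen (t.dropWhile (fun x => x == c)) rfl
      have hmain := cnt_false_run c (t.takeWhile (fun x => x == c)) (t.dropWhile (fun x => x == c)) hrun hrest
      conv_rhs => rw [show (c :: t) = c :: (t.takeWhile (fun x => x == c) ++ t.dropWhile (fun x => x == c)) from by rw [List.takeWhile_append_dropWhile]]
      rw [hmain, ihrest]

-- A-side: fold to sum
theorem foldl_step (c1 c2 : Int → Bool) : ∀ (L : List Int) (acc : Int),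
    L.foldl (fun acc i => if c1 i then acc + 1 else if c2 i then acc + 1 else acc) acc
      = acc + (L.map (fun i => if c1 i then (1:Int) else if c2 i then 1 else 0)).sum := by
  intro L
  induction L with
  | nil => simp
  | cons x L ih =>
    intro acc
    simp only [List.foldl_cons, List.map_cons, List.sum_cons, ih]
    split_ifs <;> ring

-- the per-index middle term of A
def g (l : List Char) (i : Int) : Int :=
  if PySem.List.pyGetD l i ' ' == PySem.List.pyGetD l (i - 1) ' ' then 1
  else if PySem.List.pyGetD l i ' ' == PySem.List.pyGetD l (i + 1) ' ' then 1 else 0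

theorem mid_sum (t : List Char) : ∀ a b : Char,
    ((List.range t.length).map (fun k : ℕ => g (a :: b :: t) (1 + (k : Int)))).sum = mid (a :: b :: t) := by
  induction t with
  | nil => intro a b; simp [mid]
  | cons c t ih =>
    intro a b
    have hshift : ∀ k : ℕ, g (a :: b :: c :: t) (1 + ((k + 1 : ℕ) : Int)) = g (b :: c :: t) (1 + (k : Int)) := by
      intro k
      have e1 : (1 + ((k + 1 : ℕ) : Int)) = ((k + 2 : ℕ) : Int) := by push_cast; ring
      have f1 : (1 + ((k : ℕ) : Int)) = ((k + 1 : ℕ) : Int) := by push_cast; ring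
      rw [e1, f1]
      simp only [g]
      have e2 : ((k + 2 : ℕ) : Int) - 1 = ((k + 1 : ℕ) : Int) := by push_cast; ring
      have e3 : ((k + 2 : ℕ) : Int) + 1 = ((k + 3 : ℕ) : Int) := by push_cast; ring
      have f2 : ((k + 1 : ℕ) : Int) - 1 = ((k : ℕ) : Int) := by push_cast; ring
      have f3 : ((k + 1 : ℕ) : Int) + 1 = ((k + 2 : ℕ) : Int) := by push_cast; ring
      rw [e2, e3, f2, f3]
      simp only [PySem.List.pyGetD_natCast]
      simp
    have hzero : g (a :: b :: c :: t) (1 + ((0 : ℕ) : Int)) = (if b = a then 1 else if b = c then 1 else 0) := by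
      have e1 : (1 + ((0 : ℕ) : Int)) = ((1 : ℕ) : Int) := by norm_num
      rw [e1]
      simp only [g]
      have e2 : ((1 : ℕ) : Int) - 1 = ((0 : ℕ) : Int) := by norm_num
      have e3 : ((1 : ℕ) : Int) + 1 = ((2 : ℕ) : Int) := by norm_num
      rw [e2, e3]
      simp only [PySem.List.pyGetD_natCast]
      simp [List.getD, beq_iff_eq]
    have hlen : (c :: t).length = t.length + 1 := rfl
    rw [hlen, List.range_succ_eq_map, List.map_cons, List.sum_cons, List.map_map]
    have hm : (List.range t.length).map ((fun k : ℕ => g (a :: b :: c :: t) (1 + (k : Int))) ∘ Nat.succ)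
            = (List.range t.length).map (fun k : ℕ => g (b :: c :: t) (1 + (k : Int))) :=
      List.map_congr_left (fun k _ => by simpa [Nat.succ_eq_add_one] using hshift k)
    rw [hm, ih b c]
    have hmid : mid (a :: b :: c :: t) = (if b = a then (1:Int) else if b = c then 1 else 0) + mid (b :: c :: t) := rfl
    rw [hmid, hzero]

-- last pair term of A equals lpA
theorem lpA_term (t : List Char) : ∀ a b : Char,
    (if (a :: b :: t).getD (t.length + 1) ' ' == (a :: b :: t).getD t.length ' ' then (1:Int) else 0)
      = lpA (a :: b :: t) := by
  induction t with
  | nil => intro a b; simp [lpA, List.getD, beq_iff_eq]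
  | cons c t ih =>
    intro a b
    have h := ih b c
    simp only [lpA]
    rw [← h]
    simp only [List.getD_cons_succ, List.length_cons]

theorem a_eq_cnt (seq : String) : get_repeat_count seq = cnt false seq.toList := by
  cases hl : seq.toList with
  | nil => simp [get_repeat_count, hl, cnt]
  | cons a t =>
    cases t with
    | nil => simp [get_repeat_count, hl, cnt]
    | cons b t =>
      cases t with
      | nil =>
        by_cases hab : a = b
        · subst hab
          simp [get_repeat_count, hl, cnt, PySem.List.pyGetD, PySem.List.pyGet?, PySem.List.pyIdx?]
        · have hba : ¬ b = a := fun e => hab e.symm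
          simp [get_repeat_count, hl, cnt, PySem.List.pyGetD, PySem.List.pyGet?, PySem.List.pyIdx?, hab, hba]
      | cons c t' =>
        simp only [get_repeat_count, hl]
        have hn : (((a :: b :: c :: t').length : ℕ) : Int) = (t'.length : Int) + 3 := by
          simp only [List.length_cons]; push_cast; ring
        rw [hn, if_neg (by omega), if_pos (by omega)]
        -- boundary conditions
        have h01 : (PySem.List.pyGetD (a :: b :: c :: t') 0 ' ' == PySem.List.pyGetD (a :: b :: c :: t') 1 ' ') = (a == b) := by
          rw [show (0:Int) = ((0:ℕ):Int) from by norm_num, show (1:Int) = ((1:ℕ):Int) from by norm_num,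
              PySem.List.pyGetD_natCast, PySem.List.pyGetD_natCast]
          simp [List.getD, List.getElem?_cons]
        have e1 : ((t'.length : Int) + 3) - 1 = ((t'.length + 2 : ℕ) : Int) := by push_cast; ring
        have e2 : ((t'.length : Int) + 3) - 2 = ((t'.length + 1 : ℕ) : Int) := by push_cast; ring
        have hlast : (PySem.List.pyGetD (a :: b :: c :: t') (((t'.length : Int) + 3) - 1) ' '
                       == PySem.List.pyGetD (a :: b :: c :: t') (((t'.length : Int) + 3) - 2) ' ')
                   = ((a :: b :: c :: t').getD ((c :: t').length + 1) ' ' == (a :: b :: c :: t').getD ((c :: t').length) ' ') := by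
          rw [e1, e2]
          simp only [PySem.List.pyGetD_natCast, List.length_cons]
        rw [h01, hlast]
        -- the middle fold
        rw [show ((t'.length : Int) + 3) - 1 = (t'.length : Int) + 2 from by ring]
        rw [PySem.List.pyRange_one]
        rw [show (((t'.length : Int) + 2) - 1).toNat = t'.length + 1 from by omega]
        rw [foldl_step (fun i => PySem.List.pyGetD (a :: b :: c :: t') i ' ' == PySem.List.pyGetD (a :: b :: c :: t') (i - 1) ' ')
                       (fun i => PySem.List.pyGetD (a :: b :: c :: t') i ' ' == PySem.List.pyGetD (a :: b :: c :: t') (i + 1) ' ')]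
        rw [List.map_map]
        have hcomp : ((fun i => if PySem.List.pyGetD (a :: b :: c :: t') i ' ' == PySem.List.pyGetD (a :: b :: c :: t') (i - 1) ' ' then (1:Int)
                        else if PySem.List.pyGetD (a :: b :: c :: t') i ' ' == PySem.List.pyGetD (a :: b :: c :: t') (i + 1) ' ' then 1 else 0)
                      ∘ (fun k : ℕ => (1:Int) + (k : Int)))
                   = (fun k : ℕ => g (a :: b :: c :: t') (1 + (k : Int))) := rfl
        rw [hcomp]
        have hms := mid_sum (c :: t') a b
        simp only [List.length_cons] at hms
        rw [hms]
        -- assemble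
        have hrc : ∀ (C : Bool) (x : Int), (if C then x + 1 else x) = x + (if C then (1:Int) else 0) := by
          intro C x; cases C <;> simp
        rw [hrc, hrc, lpA_term (c :: t') a b]
        have hcnt : cnt false (a :: b :: c :: t') = (if (false || (a == b)) then (1:Int) else 0) + cnt (a == b) (b :: c :: t') := rfl
        rw [hcnt, ← lpA_mid_cnt]
        simp only [Bool.false_or]
        ring

-- ===== VERDICT (by name: the statement is the Claim_ definition above) =====
theorem get_repeat_count_spec : Claim_equal_get_repeat_count := by
  intro seq _
  unfold Spec_get_repeat_count get_repeat_count_alt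
  rw [a_eq_cnt, runsCount_eq_cnt seq.toList.length seq.toList rfl]
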